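-- pv_equiv track=rewrite | github.com/pypi-data/pypi-mirror-386 | packages/ibm-watsonx-orchestrate-evaluation-framework/ibm_watsonx_orchestrate_evaluation_framework-1.1.7-py3-none-any.whl/wxo_agentic_evaluation/evaluation_package.py | find_ground_node
-- ===== SOURCE A (Python) =====
-- def find_ground_node(graph, start_node):
--     """Simple implementation. Should be fixed in the future
--
--     Assumes that there is a single graph node that does not have children
--     """
--
--     stack = [start_node]
--     visited_set = set()
--
--     while stack:
--         node = stack.pop()
--         if node not in visited_set:
--             visited_set.add(node)
--
--             # check for children
--             # improvement for future: add the ground nodes here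
--             # right now, just return the first one
--             if not graph.get(node):
--                 return node
--
--             stack.extend(graph[node])
--
--     return None
-- ===== SOURCE B (Python) =====
-- def find_ground_node(graph, start_node):
--     """Recursive DFS with a shared visited set; children are explored
--     last-first, matching the LIFO order of the original stack loop."""
--     visited = set()
--
--     def dfs(node):
--         if node in visited:
--             return None
--         visited.add(node)
--         children = graph.get(node)
--         if not children:
--             return node
--         for child in reversed(children):
--             result = dfs(child)
--             if result is not None:
--                 return result
--         return None
--
--     return dfs(start_node)
-- ===== Notes on version B (the rewrite author's own statement) =====
-- stated objective: alternative
-- what changed: A's explicit while-loop over a manual LIFO stack is replaced by a recursive DFS helper with a shared visited set that recurses into the children (last-first, the stack's pop order) and propagates the first childless node found.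
import Mathlib
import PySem

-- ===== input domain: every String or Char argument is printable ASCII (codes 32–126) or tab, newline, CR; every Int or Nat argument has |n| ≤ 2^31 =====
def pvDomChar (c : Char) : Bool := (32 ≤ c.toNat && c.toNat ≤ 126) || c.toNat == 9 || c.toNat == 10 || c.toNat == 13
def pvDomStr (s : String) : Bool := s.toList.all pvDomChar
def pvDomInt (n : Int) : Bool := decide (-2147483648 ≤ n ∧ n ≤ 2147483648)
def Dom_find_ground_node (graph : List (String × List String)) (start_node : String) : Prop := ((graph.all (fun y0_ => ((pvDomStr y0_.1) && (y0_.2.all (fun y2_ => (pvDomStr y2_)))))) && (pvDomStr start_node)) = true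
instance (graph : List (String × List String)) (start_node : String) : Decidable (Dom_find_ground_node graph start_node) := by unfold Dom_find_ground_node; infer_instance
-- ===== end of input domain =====

-- B replaces A's explicit while-loop over a manual LIFO stack by a recursive DFS helper with a
-- shared visited set (children explored last-first, the stack's pop order); same cost, different decomposition.


-- ===== PORT A =====
-- the graph's keys / the largest children-list length: used only by the termination measure
def fgnU (g : List (String × List String)) : List String := g.map Prod.fst
def fgnD (g : List (String × List String)) : Nat := (g.map (fun p => p.2.length)).foldr max 0
-- how many keys of g are still unvisited
def fgnFilt (g : List (String × List String)) (v : PySem.Set String) : Nat :=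
  ((fgnU g).filter (fun x => decide (x ∉ v))).length

-- dict.get(node): lookup in the association list (= PySem.Dict first-match lookup)
-- facts about a successful lookup, needed by the loop's termination argument
theorem fgnGet_mem (g : List (String × List String)) (n : String) (ch : List String)
    (h : PySem.Dict.get? (PySem.Dict.mk g) n = some ch) : n ∈ fgnU g ∧ ch.length ≤ fgnD g := by
  induction g with
  | nil => simp [PySem.Dict.get?] at h
  | cons p rest ih =>
    obtain ⟨k, val⟩ := p
    rw [PySem.Dict.get?_mk_cons] at h
    by_cases hk : k == n
    · simp [hk] at h
      subst h
      refine ⟨by simp [fgnU, (by simpa using hk : k = n)], by simp [fgnD]⟩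
    · simp [hk] at h
      obtain ⟨h1, h2⟩ := ih h
      exact ⟨by simp [fgnU] at h1 ⊢; exact Or.inr h1, by simp [fgnD] at h2 ⊢; omega⟩

theorem fgnFilt_lt (g : List (String × List String)) (v : PySem.Set String) (n : String)
    (hU : n ∈ fgnU g) (hv : n ∉ v) : fgnFilt g (v.add n) < fgnFilt g v := by
  unfold fgnFilt
  rw [PySem.Set.add_of_not_mem hv]
  have hpred : ∀ x ∈ fgnU g, (decide (x ∉ v ++ [n])) = (decide (x ≠ n) && decide (x ∉ v)) := by
    intro x _
    by_cases h1 : x ∈ v <;> by_cases h2 : x = n <;> simp [h1, h2]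
  rw [List.filter_congr hpred, ← List.filter_filter]
  refine List.length_filter_lt_length_iff_exists.mpr ⟨n, List.mem_filter.mpr ⟨hU, ?_⟩, ?_⟩ <;>
    simp [hv]

-- A's while-loop: stack.pop() takes the last element; visited marks on pop; childless node returned
def fgnLoop (g : List (String × List String)) (visited : PySem.Set String) (stack : List String) :
    Option String :=
  if hs : stack = [] then none
  else
    let node := stack.getLast hs
    let rest := stack.dropLast
    if visited.contains node then fgnLoop g visited rest
    else
      match hg : PySem.Dict.get? (PySem.Dict.mk g) node with
      | none => some node            -- not graph.get(node): missing key
      | some [] => some node         -- not graph.get(node): empty children list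
      | some ch => fgnLoop g (visited.add node) (rest ++ ch)   -- stack.extend(graph[node])
termination_by fgnFilt g visited * (fgnD g + 1) + stack.length
decreasing_by
  · have : stack.length ≠ 0 := fun h => hs (List.eq_nil_of_length_eq_zero h)
    have hd : stack.dropLast.length = stack.length - 1 := by simp
    omega
  · rename_i hcon
    have hnv : node ∉ visited := by
      intro hmem
      exact hcon ((PySem.Set.contains_iff visited node).mpr hmem)
    obtain ⟨hU, hD⟩ := fgnGet_mem g node ch hg
    have h1 : fgnFilt g (visited.add (stack.getLast hs)) + 1 ≤ fgnFilt g visited :=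
      fgnFilt_lt g visited node hU hnv
    have h2 : (fgnFilt g (visited.add (stack.getLast hs)) + 1) * (fgnD g + 1)
        ≤ fgnFilt g visited * (fgnD g + 1) := Nat.mul_le_mul_right _ h1
    have h3 : stack.dropLast.length = stack.length - 1 := by simp
    have h4 : stack.length ≠ 0 := fun h => hs (List.eq_nil_of_length_eq_zero h)
    have h5 : (fgnFilt g (visited.add (stack.getLast hs)) + 1) * (fgnD g + 1)
        = fgnFilt g (visited.add (stack.getLast hs)) * (fgnD g + 1) + (fgnD g + 1) := by ring
    simp only [List.length_append]
    omega

def find_ground_node (graph : List (String × List String)) (start_node : String) : Option String :=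
  fgnLoop graph PySem.Set.empty [start_node]

-- ===== PORT B =====
-- B's recursive dfs helper; the Nat argument is a fuel guard only (the top-level fuel
-- (fgnU graph).length + 1 is provably never exhausted); it threads the shared visited set
mutual
def fgnDfs (g : List (String × List String)) (fuel : Nat) (node : String)
    (visited : PySem.Set String) : PySem.Set String × Option String :=
  match fuel with
  | 0 => (visited, none)
  | fuel + 1 =>
    if visited.contains node then (visited, none)
    else
      match PySem.Dict.get? (PySem.Dict.mk g) node with
      | none => (visited.add node, some node)     -- not children
      | some [] => (visited.add node, some node)  -- not children
      | some ch => fgnDfsRev g fuel ch.reverse (visited.add node)  -- for child in reversed(children)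
  termination_by (fuel, 0)

def fgnDfsRev (g : List (String × List String)) (fuel : Nat) (cs : List String)
    (visited : PySem.Set String) : PySem.Set String × Option String :=
  match cs with
  | [] => (visited, none)
  | c :: rest =>
    match fgnDfs g fuel c visited with
    | (v', some r) => (v', some r)    -- if result is not None: return result
    | (v', none) => fgnDfsRev g fuel rest v'
  termination_by (fuel, cs.length + 1)
end

def find_ground_node_alt (graph : List (String × List String)) (start_node : String) : Option String :=
  (fgnDfs graph ((fgnU graph).length + 1) start_node PySem.Set.empty).2

-- ===== PRECONDITION & SPEC =====
def Spec_find_ground_node (graph : List (String × List String)) (start_node : String) (out : Option String) : Prop := out = find_ground_node_alt graph start_node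
instance (graph : List (String × List String)) (start_node : String) (out : Option String) : Decidable (Spec_find_ground_node graph start_node out) := by unfold Spec_find_ground_node; infer_instance

-- ===== CLAIM (what is proved, stated in full; the proofs are below) =====
def Claim_equal_find_ground_node : Prop := ∀ (graph : List (String × List String)) (start_node : String), Dom_find_ground_node graph start_node → Spec_find_ground_node graph start_node (find_ground_node graph start_node)

-- ===== LEMMAS AND PROOFS =====

-- fewer unvisited keys when the visited set grows
theorem fgnFilt_anti (g : List (String × List String)) (v v' : PySem.Set String)
    (h : ∀ x, x ∈ v → x ∈ v') : fgnFilt g v' ≤ fgnFilt g v := by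
  unfold fgnFilt
  rw [← List.countP_eq_length_filter, ← List.countP_eq_length_filter]
  refine List.countP_mono_left ?_
  intro x _ hx
  simp only [decide_eq_true_eq] at hx ⊢
  exact fun hmem => hx (h x hmem)

-- dfs/dfsRev only ever grow the visited set
theorem fgnDfs_mono (g : List (String × List String)) :
    ∀ f : Nat, (∀ n v, v ⊆ (fgnDfs g f n v).1) ∧ (∀ cs v, v ⊆ (fgnDfsRev g f cs v).1) := by
  intro f
  induction f with
  | zero =>
    constructor
    · intro n v; rw [fgnDfs]; exact fun _ h => h
    · intro cs
      induction cs with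
      | nil => intro v; rw [fgnDfsRev]; exact fun _ h => h
      | cons c rest ih =>
        intro v
        rw [fgnDfsRev]
        simp only [fgnDfs]
        exact ih v
  | succ f ihf =>
    have hdfs : ∀ n v, v ⊆ (fgnDfs g (f + 1) n v).1 := by
      intro n v
      rw [fgnDfs]
      split
      · exact fun _ h => h
      · have hadd : v ⊆ v.add n := fun x hx => (PySem.Set.mem_add v n x).mpr (Or.inl hx)
        split
        · exact hadd
        · exact hadd
        · exact hadd.trans (ihf.2 _ _)
    refine ⟨hdfs, ?_⟩
    intro cs
    induction cs with
    | nil => intro v; rw [fgnDfsRev]; exact fun _ h => h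
    | cons c rest ih =>
      intro v
      rw [fgnDfsRev]
      have h1 := hdfs c v
      cases hd : fgnDfs g (f + 1) c v with
      | mk v' r =>
        rw [hd] at h1
        cases r with
        | none => exact h1.trans (ih v')
        | some x => exact h1

-- propagating the first found result through a concatenated child list
theorem fgnDfsRev_append_some (g : List (String × List String)) (f : Nat)
    (xs ys : List String) (v v' : PySem.Set String) (r : String)
    (h : fgnDfsRev g f xs v = (v', some r)) :
    fgnDfsRev g f (xs ++ ys) v = (v', some r) := by
  induction xs generalizing v with
  | nil => rw [fgnDfsRev] at h; exact absurd h (by simp)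
  | cons c rest ih =>
    simp only [List.cons_append]
    rw [fgnDfsRev] at h; rw [fgnDfsRev]
    cases hd : fgnDfs g f c v with
    | mk w o =>
      cases o with
      | none => simp only [hd] at h ⊢; exact ih _ h
      | some x => simp only [hd] at h ⊢; exact h

theorem fgnDfsRev_append_none (g : List (String × List String)) (f : Nat)
    (xs ys : List String) (v v' : PySem.Set String)
    (h : fgnDfsRev g f xs v = (v', none)) :
    fgnDfsRev g f (xs ++ ys) v = fgnDfsRev g f ys v' := by
  induction xs generalizing v with
  | nil => rw [fgnDfsRev] at h; simp_all
  | cons c rest ih =>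
    simp only [List.cons_append]
    rw [fgnDfsRev] at h; rw [fgnDfsRev]
    cases hd : fgnDfs g f c v with
    | mk w o =>
      cases o with
      | none => simp only [hd] at h ⊢; exact ih _ h
      | some x => simp only [hd] at h; exact absurd h (by simp)

-- unfolding A's loop for one pop from a nonempty stack
theorem fgnLoop_nil (g : List (String × List String)) (v : PySem.Set String) :
    fgnLoop g v [] = none := by rw [fgnLoop]; simp

theorem fgnLoop_concat (g : List (String × List String)) (v : PySem.Set String)
    (rest : List String) (n : String) :
    fgnLoop g v (rest ++ [n]) =
      if v.contains n then fgnLoop g v rest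
      else
        match PySem.Dict.get? (PySem.Dict.mk g) n with
        | none => some n
        | some [] => some n
        | some ch => fgnLoop g (v.add n) (rest ++ ch) := by
  have hne : rest ++ [n] ≠ [] := by simp
  have hlast : (rest ++ [n]).getLast hne = n := by simp
  have hdrop : (rest ++ [n]).dropLast = rest := by simp
  rw [fgnLoop, dif_neg hne]
  simp only [hlast, hdrop]
  by_cases hc : v.contains n = true
  · rw [if_pos hc, if_pos hc]
  · rw [if_neg hc, if_neg hc]
    split
    · rename_i heq
      rw [hlast] at heq
      rw [heq]
    · rename_i heq
      rw [hlast] at heq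
      rw [heq]
    · rename_i ch0 hch0 heq
      rw [hlast] at heq
      rw [heq]
      cases ch0 with
      | nil => exact absurd rfl hch0
      | cons a as => rfl

-- the simulation: A's stack loop computes exactly B's dfs over the reversed stack,
-- for any sufficient fuel
theorem fgnMain (g : List (String × List String)) :
    ∀ (k : Nat) (v : PySem.Set String) (s : List String) (f : Nat),
      fgnFilt g v * (fgnD g + 1) + s.length ≤ k → fgnFilt g v + 1 ≤ f →
      fgnLoop g v s = (fgnDfsRev g f s.reverse v).2 := by
  intro k
  induction k with
  | zero =>
    intro v s f hM _
    have hs : s = [] := List.eq_nil_of_length_eq_zero (by omega)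
    subst hs
    simp only [List.reverse_nil]
    rw [fgnLoop_nil, fgnDfsRev]
  | succ k ih =>
    intro v s f hM hf
    by_cases hs : s = []
    · subst hs
      simp only [List.reverse_nil]
      rw [fgnLoop_nil, fgnDfsRev]
    · obtain ⟨rest, n, rfl⟩ : ∃ rest n, s = rest ++ [n] :=
        ⟨s.dropLast, s.getLast hs, (List.dropLast_concat_getLast hs).symm⟩
      obtain ⟨f', rfl⟩ : ∃ f', f = f' + 1 := ⟨f - 1, by omega⟩
      have hM' : fgnFilt g v * (fgnD g + 1) + (rest.length + 1) ≤ k + 1 := by simpa using hM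
      have hrev : (rest ++ [n]).reverse = n :: rest.reverse := by simp
      rw [hrev, fgnLoop_concat, fgnDfsRev]
      by_cases hc : v.contains n = true
      · -- already visited: skipped on both sides
        have hmem : n ∈ v := (PySem.Set.contains_iff v n).mp hc
        have hdfs : fgnDfs g (f' + 1) n v = (v, none) := by rw [fgnDfs]; simp [hmem]
        rw [if_pos hc, hdfs]
        exact ih v rest (f' + 1) (by omega) hf
      · have hnv : n ∉ v := fun hmem => hc ((PySem.Set.contains_iff v n).mpr hmem)
        rw [if_neg hc]
        cases hg : PySem.Dict.get? (PySem.Dict.mk g) n with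
        | none =>
          have hdfs : fgnDfs g (f' + 1) n v = (v.add n, some n) := by
            rw [fgnDfs]; simp [hnv, hg]
          rw [hdfs]
        | some ch =>
          cases ch with
          | nil =>
            have hdfs : fgnDfs g (f' + 1) n v = (v.add n, some n) := by
              rw [fgnDfs]; simp [hnv, hg]
            rw [hdfs]
          | cons c cs =>
            obtain ⟨hU, hD⟩ := fgnGet_mem g n (c :: cs) hg
            have hD' : cs.length + 1 ≤ fgnD g := by simpa using hD
            have hlt : fgnFilt g (v.add n) + 1 ≤ fgnFilt g v := fgnFilt_lt g v n hU hnv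
            have hmul : (fgnFilt g (v.add n) + 1) * (fgnD g + 1) ≤ fgnFilt g v * (fgnD g + 1) :=
              Nat.mul_le_mul_right _ hlt
            have hexp : (fgnFilt g (v.add n) + 1) * (fgnD g + 1)
                = fgnFilt g (v.add n) * (fgnD g + 1) + (fgnD g + 1) := by ring
            cases hP : fgnDfsRev g f' (c :: cs).reverse (v.add n) with
            | mk v'' r =>
              have hdfs : fgnDfs g (f' + 1) n v = (v'', r) := by
                rw [fgnDfs]
                rw [if_neg hc, hg]; exact hP
              have hih1 : fgnLoop g (v.add n) (rest ++ (c :: cs))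
                  = (fgnDfsRev g f' ((c :: cs).reverse ++ rest.reverse) (v.add n)).2 := by
                have h := ih (v.add n) (rest ++ (c :: cs)) f'
                  (by simp only [List.length_append, List.length_cons]; omega)
                  (by omega)
                simpa using h
              rw [hdfs]
              cases r with
              | some x =>
                show fgnLoop g (v.add n) (rest ++ (c :: cs)) = some x
                rw [hih1, fgnDfsRev_append_some g f' _ _ _ _ _ hP]
              | none =>
                have hmono : (v.add n) ⊆ v'' := by
                  have h := (fgnDfs_mono g f').2 (c :: cs).reverse (v.add n)
                  rw [hP] at h
                  exact h
                have hanti : fgnFilt g v'' ≤ fgnFilt g (v.add n) :=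
                  fgnFilt_anti g (v.add n) v'' (fun x hx => hmono hx)
                have hmul2 : fgnFilt g v'' * (fgnD g + 1) ≤ fgnFilt g (v.add n) * (fgnD g + 1) :=
                  Nat.mul_le_mul_right _ hanti
                have hih2 : fgnLoop g v'' rest = (fgnDfsRev g f' rest.reverse v'').2 :=
                  ih v'' rest f' (by omega) (by omega)
                have hih3 : fgnLoop g v'' rest = (fgnDfsRev g (f' + 1) rest.reverse v'').2 :=
                  ih v'' rest (f' + 1) (by omega) (by omega)
                show fgnLoop g (v.add n) (rest ++ (c :: cs))
                    = (fgnDfsRev g (f' + 1) rest.reverse v'').2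
                rw [hih1, fgnDfsRev_append_none g f' _ _ _ _ hP, ← hih2, hih3]

-- ===== VERDICT (by name: the statement is the Claim_ definition above) =====
theorem find_ground_node_spec : Claim_equal_find_ground_node := by
  intro graph start_node _
  unfold Spec_find_ground_node find_ground_node find_ground_node_alt
  have h := fgnMain graph (fgnFilt graph PySem.Set.empty * (fgnD graph + 1) + 1)
    PySem.Set.empty [start_node] ((fgnU graph).length + 1) (by simp)
    (by
      have : fgnFilt graph PySem.Set.empty ≤ (fgnU graph).length := List.length_filter_le _ _
      omega)
  rw [h]
  simp only [List.reverse_singleton]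
  rw [fgnDfsRev]
  cases hd : fgnDfs graph ((fgnU graph).length + 1) start_node PySem.Set.empty with
  | mk v' o => cases o <;> simp [fgnDfsRev]
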